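-- pv_equiv track=rewrite | github.com/amirdbit/telegram_creative_bot | Bot.py | split_to_segments
-- ===== SOURCE A (Python) =====
-- def split_to_segments(duration_sec: int) -> list[int]:
--     """Splits video length into VEO segments (max 8s each)."""
--     segments: list[int] = []
--     remaining = max(8, min(duration_sec, 32))
--     while remaining > 0:
--         seg = min(8, remaining)
--         segments.append(seg)
--         remaining -= seg
--     return segments
-- ===== SOURCE B (Python) =====
-- def split_to_segments(duration_sec: int) -> list[int]:
--     """Splits video length into VEO segments (max 8s each)."""
--     r = max(8, min(duration_sec, 32))
--     q, rem = divmod(r, 8)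
--     return [8] * q + ([rem] if rem else [])
-- ===== Notes on version B (the rewrite author's own statement) =====
-- stated objective: idiomatic
-- what changed: Replaces the decrementing while-loop with a closed-form divmod: the clamped duration's quotient gives the number of full 8s segments and the nonzero remainder the trailing partial one.
import Mathlib
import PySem

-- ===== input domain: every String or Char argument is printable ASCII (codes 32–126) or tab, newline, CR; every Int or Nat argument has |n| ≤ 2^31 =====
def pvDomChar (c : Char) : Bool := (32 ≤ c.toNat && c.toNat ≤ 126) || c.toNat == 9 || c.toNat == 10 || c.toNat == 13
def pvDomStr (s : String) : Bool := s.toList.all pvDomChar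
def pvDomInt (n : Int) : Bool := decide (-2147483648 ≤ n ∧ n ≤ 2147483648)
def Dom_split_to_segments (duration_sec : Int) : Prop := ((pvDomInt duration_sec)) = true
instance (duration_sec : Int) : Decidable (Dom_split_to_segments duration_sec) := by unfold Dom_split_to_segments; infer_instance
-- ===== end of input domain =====

-- B replaces A's decrementing while-loop by a closed-form divmod of the clamped duration (idiomatic, not faster).

-- ===== PORT A =====
-- while-loop of A as fuel-bounded recursion; fuel = remaining.toNat suffices since each iteration removes ≥ 1
def splitLoop : Nat → Int → List Int → List Int
  | 0, _, acc => acc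
  | fuel + 1, remaining, acc =>
    if remaining > 0 then
      splitLoop fuel (remaining - min 8 remaining) (acc ++ [min 8 remaining])
    else acc

def split_to_segments (duration_sec : Int) : List Int :=
  let remaining := max 8 (min duration_sec 32)
  splitLoop remaining.toNat remaining []

-- ===== PORT B =====
def split_to_segments_alt (duration_sec : Int) : List Int :=
  let r := max 8 (min duration_sec 32)
  let q := PySem.Int.floordiv r 8
  let rem := PySem.Int.mod r 8
  List.replicate q.toNat 8 ++ (if rem ≠ 0 then [rem] else [])

-- ===== PRECONDITION & SPEC =====
def Spec_split_to_segments (duration_sec : Int) (out : List Int) : Prop := out = split_to_segments_alt duration_sec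
instance (duration_sec : Int) (out : List Int) : Decidable (Spec_split_to_segments duration_sec out) := by unfold Spec_split_to_segments; infer_instance

-- ===== CLAIM (what is proved, stated in full; the proofs are below) =====
def Claim_equal_split_to_segments : Prop := ∀ (duration_sec : Int), Dom_split_to_segments duration_sec → Spec_split_to_segments duration_sec (split_to_segments duration_sec)

-- ===== LEMMAS AND PROOFS =====
-- both ports depend only on the clamped value r ∈ [8, 32]; check all 25 cases
theorem split_key (r : Int) (h1 : 8 ≤ r) (h2 : r ≤ 32) :
    splitLoop r.toNat r [] =
      List.replicate (PySem.Int.floordiv r 8).toNat 8 ++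
        (if PySem.Int.mod r 8 ≠ 0 then [PySem.Int.mod r 8] else []) := by
  interval_cases r <;> decide

-- ===== VERDICT (by name: the statement is the Claim_ definition above) =====
theorem split_to_segments_spec : Claim_equal_split_to_segments := by
  intro d _
  unfold Spec_split_to_segments split_to_segments split_to_segments_alt
  exact split_key (max 8 (min d 32)) (by omega) (by omega)
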